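-- pv_equiv track=rewrite | github.com/thelawclaw11/python_algo | algorithmDesignManuel/three/magazine.py | check
-- ===== SOURCE A (Python) =====
-- from collections import defaultdict
--
-- def check(text, search):
--     text_table = defaultdict(int)
--     search_table = defaultdict(int)
--
--     for c in search:
--         search_table[c] += 1
--
--     for c in text:
--         text_table[c] += 1
--
--     for char, count in search_table.items():
--         if text_table[char] < count:
--             return False
--
--     return True
-- ===== SOURCE B (Python) =====
-- def check(text, search):
--     counts = {}
--     for c in text:
--         counts[c] = counts.get(c, 0) + 1
--     for c in search:
--         n = counts.get(c, 0)
--         if n == 0: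
--             return False
--         counts[c] = n - 1
--     return True
-- ===== Notes on version B (the rewrite author's own statement) =====
-- stated objective: alternative
-- what changed: B builds a frequency table for text only and consumes it while scanning search with an inline early exit, instead of A's two tables plus a separate comparison pass.
import Mathlib
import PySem

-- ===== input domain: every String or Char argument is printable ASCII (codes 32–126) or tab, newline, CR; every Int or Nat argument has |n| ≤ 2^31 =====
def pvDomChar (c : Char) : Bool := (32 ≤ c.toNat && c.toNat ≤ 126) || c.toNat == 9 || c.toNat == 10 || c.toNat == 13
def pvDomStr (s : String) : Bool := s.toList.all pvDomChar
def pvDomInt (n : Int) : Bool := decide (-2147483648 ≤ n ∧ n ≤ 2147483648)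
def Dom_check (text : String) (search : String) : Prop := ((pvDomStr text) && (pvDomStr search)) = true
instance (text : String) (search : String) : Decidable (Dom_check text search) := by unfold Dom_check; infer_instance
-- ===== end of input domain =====

-- B builds one frequency table for text and consumes it while scanning search with an early exit,
-- replacing A's two tables and separate comparison pass (alternative decomposition, same cost).


-- ===== PORT A =====
-- defaultdict(int) counting loops = PySem.Dict.modify with default 0; the read
-- text_table[char] inserts a 0 into text_table in Python, which cannot affect the result.
def check (text : String) (search : String) : Bool :=
  let searchTable := search.toList.foldl (fun d c => d.modify c 0 (· + 1)) (PySem.Dict.empty : PySem.Dict Char Int)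
  let textTable := text.toList.foldl (fun d c => d.modify c 0 (· + 1)) (PySem.Dict.empty : PySem.Dict Char Int)
  searchTable.items.all (fun p => !(textTable.getD p.1 0 < p.2))

-- ===== PORT B =====
def checkConsume (table : PySem.Dict Char Int) : List Char → Bool
  | [] => true
  | c :: rest =>
    let n := table.getD c 0
    if n == 0 then false else checkConsume (table.insert c (n - 1)) rest

def check_alt (text : String) (search : String) : Bool :=
  let counts := text.toList.foldl (fun d c => d.insert c (d.getD c 0 + 1)) (PySem.Dict.empty : PySem.Dict Char Int)
  checkConsume counts search.toList

-- ===== PRECONDITION & SPEC =====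
def Spec_check (text : String) (search : String) (out : Bool) : Prop := out = check_alt text search
instance (text : String) (search : String) (out : Bool) : Decidable (Spec_check text search out) := by unfold Spec_check; infer_instance

-- ===== CLAIM (what is proved, stated in full; the proofs are below) =====
def Claim_equal_check : Prop := ∀ (text : String) (search : String), Dom_check text search → Spec_check text search (check text search)

-- ===== LEMMAS AND PROOFS =====

-- A returns true iff every char of search occurs at least as often in text.
theorem check_char : ∀ (text search : String),
    check text search = true ↔ ∀ c ∈ search.toList, (search.toList.count c : Int) ≤ text.toList.count c := by
  intro text search
  unfold check
  simp only [← PySem.Dict.counter_eq_foldl, PySem.Dict.items_counter, List.all_map, List.all_eq_true]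
  constructor
  · intro h c hc
    have := h c ((PySem.Set.mem_ofList _ _).mpr hc)
    simp only [PySem.Dict.getD_counter] at this
    simpa using this
  · intro h c hc
    have := h c ((PySem.Set.mem_ofList _ _).mp hc)
    simp only [PySem.Dict.getD_counter]
    simpa using this

-- Consuming-loop characterisation, under the invariant that the table is nonnegative.
theorem checkConsume_char : ∀ (l : List Char) (d : PySem.Dict Char Int),
    (∀ c, 0 ≤ d.getD c 0) →
    (checkConsume d l = true ↔ ∀ c ∈ l, (l.count c : Int) ≤ d.getD c 0) := by
  intro l
  induction l with
  | nil => intro d _; simp [checkConsume]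
  | cons c rest ih =>
    intro d hd
    unfold checkConsume
    by_cases h0 : d.getD c 0 = 0
    · simp only [h0]
      simp only [beq_self_eq_true, if_true]
      constructor
      · intro h; exact absurd h (by simp)
      · intro h
        have := h c (by simp)
        simp [h0, List.count_cons_self] at this
        omega
    · have hne : (d.getD c 0 == 0) = false := by simpa using h0
      simp only [hne, Bool.false_eq_true, if_false]
      have hinv : ∀ c', 0 ≤ (d.insert c (d.getD c 0 - 1)).getD c' 0 := by
        intro c'
        rw [PySem.Dict.getD_insert]
        split_ifs with hc
        · have := hd c; omega
        · exact hd c'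
      rw [ih _ hinv]
      constructor
      · intro h c' hc'
        by_cases hcc : c' = c
        · subst hcc
          by_cases hmem : c' ∈ rest
          · have := h c' hmem
            rw [PySem.Dict.getD_insert, if_pos rfl] at this
            simp only [List.count_cons_self]
            push_cast
            omega
          · have := hd c'
            simp [List.count_cons_self, List.count_eq_zero_of_not_mem hmem]
            omega
        · have hmem : c' ∈ rest := by
            rcases List.mem_cons.mp hc' with h1 | h1
            · exact absurd h1 hcc
            · exact h1
          have := h c' hmem
          rw [PySem.Dict.getD_insert, if_neg hcc] at this
          simpa [List.count_cons, Ne.symm hcc] using this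
      · intro h c' hc'
        rw [PySem.Dict.getD_insert]
        split_ifs with hcc
        · subst hcc
          have := h c' (by simp)
          simp only [List.count_cons_self] at this
          push_cast at this ⊢
          omega
        · have := h c' (by simp [hc'])
          simpa [List.count_cons, Ne.symm hcc] using this

-- B returns true iff every char of search occurs at least as often in text.
theorem check_alt_char : ∀ (text search : String),
    check_alt text search = true ↔ ∀ c ∈ search.toList, (search.toList.count c : Int) ≤ text.toList.count c := by
  intro text search
  unfold check_alt
  simp only [PySem.Dict.foldl_insert_getD_add_one_eq_counter]
  rw [checkConsume_char _ _ (by intro c; rw [PySem.Dict.getD_counter]; positivity)]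
  simp only [PySem.Dict.getD_counter]

-- ===== VERDICT (by name: the statement is the Claim_ definition above) =====
theorem check_spec : Claim_equal_check := by
  intro text search _
  unfold Spec_check
  rw [Bool.eq_iff_iff, check_char, check_alt_char]
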